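-- pv_equiv track=rewrite | github.com/WMDA/ctf | tools/bug_bounty/crt.py | parsing
-- ===== SOURCE A (Python) =====
-- def parsing(json_file:dict) -> dict:
--
--     '''
--     Function to parse through the response from crt.sh and extracts relevant
--
--     Parameters
--     ----------
--     json_file:dict Dictionary/json file of response
--
--     Returns
--     -------
--     results:dict Dictionary of two lists of sub_domains and potential_sub_domains
--     '''
--
--     sub_domains = []
--     potential_sub_domains = []
--
--     for index in range(len(json_file)):
--         name = json_file[index]['name_value']
--         name_split = name.split('\n')
--
--         for sub_domain in name_split:
--             if '*' in sub_domain: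
--                 potential_sub_domains.append(sub_domain)
--
--             if '.' in sub_domain and '*' not in sub_domain:
--                 sub_domains.append(sub_domain)
--
--     results = {
--         'sub_domains' : sub_domains,
--         'potential_sub_domains' : potential_sub_domains,
--         }
--
--     return results
-- ===== SOURCE B (Python) =====
-- def parsing(json_file: dict) -> dict:
--     '''Character-level state machine: scan each name_value once, building each label and
--     its '.'/'*' flags on the fly; no split() and no substring membership tests.'''
--     sub_domains = []
--     potential_sub_domains = []
--     for entry in json_file:
--         cur = []
--         has_dot = False
--         has_star = False
--         for ch in entry['name_value'] + '\n':
--             if ch == '\n':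
--                 label = ''.join(cur)
--                 if has_star:
--                     potential_sub_domains.append(label)
--                 elif has_dot:
--                     sub_domains.append(label)
--                 cur = []
--                 has_dot = False
--                 has_star = False
--             elif ch == '.':
--                 cur.append(ch)
--                 has_dot = True
--             elif ch == '*':
--                 cur.append(ch)
--                 has_star = True
--             else:
--                 cur.append(ch)
--     return {
--         'sub_domains': sub_domains,
--         'potential_sub_domains': potential_sub_domains,
--     }
-- ===== Notes on version B (the rewrite author's own statement) =====
-- stated objective: alternative
-- what changed: Replaces A's split('\n') plus per-label substring membership tests with a character-level state machine that scans each name_value once, assembling each label and tracking its '.'/'*' flags on the fly and flushing the finished label at every newline.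
import Mathlib
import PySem

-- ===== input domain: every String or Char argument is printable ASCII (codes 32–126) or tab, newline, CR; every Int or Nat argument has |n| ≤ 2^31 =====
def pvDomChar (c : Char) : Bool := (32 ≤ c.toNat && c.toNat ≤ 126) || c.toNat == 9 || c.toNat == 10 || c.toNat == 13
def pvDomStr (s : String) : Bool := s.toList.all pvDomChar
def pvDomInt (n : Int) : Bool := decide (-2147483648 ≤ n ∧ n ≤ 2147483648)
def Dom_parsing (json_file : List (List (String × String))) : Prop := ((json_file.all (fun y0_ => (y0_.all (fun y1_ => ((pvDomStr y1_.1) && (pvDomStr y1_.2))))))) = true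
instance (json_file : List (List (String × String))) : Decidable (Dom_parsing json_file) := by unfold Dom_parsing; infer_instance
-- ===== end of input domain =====

-- B replaces A's split-then-substring-membership classification by a character-level state
-- machine that scans each name_value once, building each label and its '.'/'*' flags on the fly.

-- dict lookup (first match), shared by both ports; Pre_ guarantees the key is present
def pvLookup (entry : List (String × String)) (k : String) : String :=
  ((entry.find? (fun p => p.1 == k)).map (fun p => p.2)).getD ""

-- ===== PORT A =====
-- the body of A's inner 'for sub_domain in name_split' loop
def pvClassify (acc : List String × List String) (sub_domain : String) : List String × List String :=
  let acc := if PySem.Str.isIn "*" sub_domain then (acc.1, acc.2 ++ [sub_domain]) else acc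
  if PySem.Str.isIn "." sub_domain && !PySem.Str.isIn "*" sub_domain
  then (acc.1 ++ [sub_domain], acc.2) else acc

-- the body of A's outer 'for index in range(len(json_file))' loop (applied to json_file[index])
def pvEntryStep (acc : List String × List String) (entry : List (String × String)) : List String × List String :=
  let name := pvLookup entry "name_value"
  let name_split := (PySem.Str.split? name "\n").getD []
  name_split.foldl pvClassify acc

-- literal transliteration: classify each label of json_file[index]['name_value'].split('\n') as we go
def parsing (json_file : List (List (String × String))) : List (String × List String) :=
  let acc :=
    (PySem.List.pyRange 0 (PySem.List.len json_file) 1).foldl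
      (fun (acc : List String × List String) index => pvEntryStep acc (PySem.List.pyGetD json_file index []))
      ([], [])
  [("sub_domains", acc.1), ("potential_sub_domains", acc.2)]

-- ===== PORT B =====
-- scanner state: (cur, has_dot, has_star, sub_domains, potential_sub_domains)
def pvCharStep (st : List Char × Bool × Bool × List String × List String) (ch : Char) :
    List Char × Bool × Bool × List String × List String :=
  match st with
  | (cur, has_dot, has_star, subs, pots) =>
    if ch = '\n' then
      let label := String.mk cur
      if has_star then ([], false, false, subs, pots ++ [label])
      else if has_dot then ([], false, false, subs ++ [label], pots)
      else ([], false, false, subs, pots)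
    else if ch = '.' then (cur ++ [ch], true, has_star, subs, pots)
    else if ch = '*' then (cur ++ [ch], has_dot, true, subs, pots)
    else (cur ++ [ch], has_dot, has_star, subs, pots)

-- B's outer loop body: scan entry['name_value'] + '\n' with a fresh cur/flags state
def pvScanEntry (acc : List String × List String) (entry : List (String × String)) :
    List String × List String :=
  let st := ((pvLookup entry "name_value").toList ++ ['\n']).foldl pvCharStep
              ([], false, false, acc.1, acc.2)
  (st.2.2.2.1, st.2.2.2.2)

def parsing_alt (json_file : List (List (String × String))) : List (String × List String) :=
  let acc := json_file.foldl pvScanEntry ([], [])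
  [("sub_domains", acc.1), ("potential_sub_domains", acc.2)]

-- ===== PRECONDITION & SPEC =====
-- Pre_ excludes exactly the inputs on which A raises KeyError: an entry without the key 'name_value'.
def Pre_parsing (json_file : List (List (String × String))) : Prop :=
  json_file.all (fun e => e.any (fun p => p.1 == "name_value")) = true
instance (json_file : List (List (String × String))) : Decidable (Pre_parsing json_file) := by unfold Pre_parsing; infer_instance
def pvWitness_parsing : (List (List (String × String))) := [[("name_value", "a.b\n*.c")]]
def Spec_parsing (json_file : List (List (String × String))) (out : List (String × List String)) : Prop := out = parsing_alt json_file
instance (json_file : List (List (String × String))) (out : List (String × List String)) : Decidable (Spec_parsing json_file out) := by unfold Spec_parsing; infer_instance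

-- ===== CLAIM (what is proved, stated in full; the proofs are below) =====
def Claim_equal_parsing : Prop := ∀ (json_file : List (List (String × String))), Dom_parsing json_file → Pre_parsing json_file → Spec_parsing json_file (parsing json_file)

-- ===== LEMMAS AND PROOFS =====

-- reference split-at-newline on char lists (proof-side only)
def splitNl : List Char → List (List Char)
  | [] => [[]]
  | c :: cs =>
    if c = '\n' then [] :: splitNl cs
    else
      match splitNl cs with
      | [] => [[c]]
      | p :: ps => (c :: p) :: ps

lemma splitNl_ne_nil (cs : List Char) : splitNl cs ≠ [] := by
  induction cs with
  | nil => simp [splitNl]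
  | cons c cs ih =>
    unfold splitNl
    split_ifs with h
    · simp
    · cases hs : splitNl cs <;> simp

-- the labels produced by the scanner, classified as A classifies them
def potsOf (parts : List (List Char)) : List String :=
  (parts.filter (fun p => p.contains '*')).map String.mk
def subsOf (parts : List (List Char)) : List String :=
  (parts.filter (fun p => !p.contains '*' && p.contains '.')).map String.mk

lemma go_spec (l : List Char) (fuel : Nat) (cur : List Char) (acc : List (List Char))
    (h : l.length ≤ fuel) :
    PySem.Chars.splitOn.go ['\n'] fuel l cur acc
      = acc.reverse ++
        (match splitNl l with
         | [] => [cur.reverse]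
         | p :: ps => (cur.reverse ++ p) :: ps) := by
  induction fuel generalizing l cur acc with
  | zero =>
    interval_cases hl : l.length
    have : l = [] := List.length_eq_zero_iff.mp hl
    subst this
    simp [PySem.Chars.splitOn.go, splitNl]
  | succ fuel ih =>
    cases l with
    | nil => simp [PySem.Chars.splitOn.go, splitNl]
    | cons c rest =>
      by_cases hc : c = '\n'
      · subst hc
        have hpre : List.isPrefixOf ['\n'] ('\n' :: rest) = true := by simp [List.isPrefixOf]
        rw [show PySem.Chars.splitOn.go ['\n'] (fuel+1) ('\n' :: rest) cur acc
              = PySem.Chars.splitOn.go ['\n'] fuel rest [] (cur.reverse :: acc) by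
            simp [PySem.Chars.splitOn.go, hpre]]
        rw [ih rest [] (cur.reverse :: acc) (by simpa using Nat.le_of_succ_le_succ (by simpa using h))]
        simp [splitNl]
        cases hs : splitNl rest with
        | nil => exact absurd hs (splitNl_ne_nil rest)
        | cons p ps => simp
      · have hpre : List.isPrefixOf ['\n'] (c :: rest) = false := by
          simp [List.isPrefixOf]; exact fun hh => hc hh.symm
        rw [show PySem.Chars.splitOn.go ['\n'] (fuel+1) (c :: rest) cur acc
              = PySem.Chars.splitOn.go ['\n'] fuel rest (c :: cur) acc by
            simp [PySem.Chars.splitOn.go, hpre]]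
        rw [ih rest (c :: cur) acc (by simpa using Nat.le_of_succ_le_succ (by simpa using h))]
        simp [splitNl, hc]
        cases hs : splitNl rest with
        | nil => exact absurd hs (splitNl_ne_nil rest)
        | cons p ps => simp

lemma splitOn_newline (cs : List Char) : PySem.Chars.splitOn cs ['\n'] = splitNl cs := by
  unfold PySem.Chars.splitOn
  rw [go_spec cs (cs.length + 1) [] [] (by omega)]
  cases hs : splitNl cs with
  | nil => exact absurd hs (splitNl_ne_nil cs)
  | cons p ps => simp

lemma isIn_single (c : Char) (p : List Char) : PySem.Chars.isIn [c] p = p.contains c := by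
  by_cases h : c ∈ p
  · have hin : [c] <:+: p := by
      obtain ⟨s, t, rfl⟩ := List.append_of_mem h
      exact ⟨s, t, by simp⟩
    simp [(PySem.Chars.isIn_iff_infix _ _).mpr hin, h]
  · have hni : ¬ [c] <:+: p := fun hin => h (hin.mem (by simp))
    simp [(PySem.Chars.isIn_eq_false_iff _ _).mpr hni, h]

lemma splitNl_no_newline (w : List Char) (h : '\n' ∉ w) : splitNl w = [w] := by
  induction w with
  | nil => rfl
  | cons c cs ih =>
    have hc : c ≠ '\n' := fun hh => h (by simp [hh])
    have : splitNl cs = [cs] := ih (fun hh => h (by simp [hh]))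
    simp [splitNl, hc, this]

lemma splitNl_cons_newline (pre cs : List Char) (h : '\n' ∉ pre) :
    splitNl (pre ++ '\n' :: cs) = pre :: splitNl cs := by
  induction pre with
  | nil => simp [splitNl]
  | cons c p ih =>
    have hc : c ≠ '\n' := fun hh => h (by simp [hh])
    have := ih (fun hh => h (by simp [hh]))
    simp [splitNl, hc, this]

lemma splitNl_append_newline (w : List Char) : splitNl (w ++ ['\n']) = splitNl w ++ [[]] := by
  induction w with
  | nil => simp [splitNl]
  | cons c cs ih =>
    by_cases hc : c = '\n'
    · simp [splitNl, hc, ih]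
    · cases hs : splitNl cs with
      | nil => exact absurd hs (splitNl_ne_nil cs)
      | cons p ps => simp [splitNl, hc, ih, hs]

lemma getLastD_irrel {α : Type} (l : List α) (h : l ≠ []) (d e : α) :
    l.getLastD d = l.getLastD e := by
  cases l with
  | nil => exact absurd rfl h
  | cons a l =>
    cases hl : (a :: l).getLast? with
    | none => simp at hl
    | some x => simp [List.getLastD, hl]

-- the scanner invariant: scanning cs from a partial label cur with correct flags
lemma scan_go (cs : List Char) : ∀ (cur : List Char) (subs pots : List String), '\n' ∉ cur →
    cs.foldl pvCharStep (cur, cur.contains '.', cur.contains '*', subs, pots)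
      = ((splitNl (cur ++ cs)).getLastD [],
         ((splitNl (cur ++ cs)).getLastD []).contains '.',
         ((splitNl (cur ++ cs)).getLastD []).contains '*',
         subs ++ subsOf (splitNl (cur ++ cs)).dropLast,
         pots ++ potsOf (splitNl (cur ++ cs)).dropLast) := by
  induction cs with
  | nil =>
    intro cur subs pots h
    simp [splitNl_no_newline cur h, subsOf, potsOf]
  | cons c cs ih =>
    intro cur subs pots h
    by_cases hc : c = '\n'
    · subst hc
      rw [List.foldl_cons]
      rw [show pvCharStep (cur, cur.contains '.', cur.contains '*', subs, pots) '\n'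
            = (([] : List Char), false, false,
               subs ++ (if !cur.contains '*' && cur.contains '.' then [String.mk cur] else []),
               pots ++ (if cur.contains '*' then [String.mk cur] else [])) by
          unfold pvCharStep
          by_cases h1 : '*' ∈ cur <;> by_cases h2 : '.' ∈ cur <;>
            simp [h1, h2, List.contains_iff_mem]]
      rw [show (([] : List Char), false, false,
               subs ++ (if !cur.contains '*' && cur.contains '.' then [String.mk cur] else []),
               pots ++ (if cur.contains '*' then [String.mk cur] else []))
            = (([] : List Char), ([] : List Char).contains '.', ([] : List Char).contains '*',
               subs ++ (if !cur.contains '*' && cur.contains '.' then [String.mk cur] else []),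
               pots ++ (if cur.contains '*' then [String.mk cur] else [])) by simp]
      rw [ih [] _ _ (by simp)]
      rw [show cur ++ '\n' :: cs = cur ++ '\n' :: ([] ++ cs) by simp]
      rw [splitNl_cons_newline cur ([] ++ cs) h]
      have hne := splitNl_ne_nil ([] ++ cs)
      have hdrop : (cur :: splitNl ([] ++ cs)).dropLast = cur :: (splitNl ([] ++ cs)).dropLast := by
        cases hs : splitNl ([] ++ cs) with
        | nil => exact absurd hs hne
        | cons p ps => simp
      have hL : (cur :: splitNl ([] ++ cs)).getLastD [] = (splitNl ([] ++ cs)).getLastD [] := by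
        rw [List.getLastD_cons, getLastD_irrel _ hne cur []]
      have hsubs : subsOf (cur :: (splitNl ([] ++ cs)).dropLast)
          = (if (!cur.contains '*' && cur.contains '.') = true then [String.mk cur] else [])
            ++ subsOf (splitNl ([] ++ cs)).dropLast := by
        simp only [subsOf, List.filter_cons]
        split_ifs <;> simp_all [List.contains_iff_mem]
      have hpots : potsOf (cur :: (splitNl ([] ++ cs)).dropLast)
          = (if cur.contains '*' = true then [String.mk cur] else [])
            ++ potsOf (splitNl ([] ++ cs)).dropLast := by
        simp only [potsOf, List.filter_cons]
        split_ifs <;> simp_all [List.contains_iff_mem]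
      rw [hdrop, hL, hsubs, hpots]
      simp [List.append_assoc]
    · rw [List.foldl_cons]
      rw [show pvCharStep (cur, cur.contains '.', cur.contains '*', subs, pots) c
            = (cur ++ [c], (cur ++ [c]).contains '.', (cur ++ [c]).contains '*', subs, pots) by
          unfold pvCharStep
          by_cases h1 : c = '.' <;> by_cases h2 : c = '*' <;>
            simp [hc, h1, h2, List.contains_append] <;>
            exact ⟨fun hh => absurd hh.symm h1, fun hh => absurd hh.symm h2⟩]
      rw [ih (cur ++ [c]) subs pots (by
        intro hm
        rcases List.mem_append.mp hm with hm | hm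
        · exact h hm
        · exact hc (List.mem_singleton.mp hm).symm)]
      simp

-- per-entry: B's scan equals A's split-and-classify
lemma entry_eq (acc : List String × List String) (e : List (String × String)) :
    pvEntryStep acc e = pvScanEntry acc e := by
  dsimp only [pvEntryStep, pvScanEntry]
  set w := (pvLookup e "name_value").toList with hw
  -- A side: split? to splitNl
  have hsplit : PySem.Str.split? (pvLookup e "name_value") "\n"
      = some ((splitNl w).map String.mk) := by
    show Option.map _ (PySem.Chars.split? _ _) = _
    have : PySem.Chars.split? w ['\n'] = some (splitNl w) := by
      unfold PySem.Chars.split?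
      simp [splitOn_newline]
    rw [show ("\n" : String).toList = ['\n'] from rfl, this]
    rfl
  rw [hsplit]
  -- B side: scanner invariant
  rw [show ([] : List Char) = ([] : List Char) from rfl]
  have hb := scan_go (w ++ ['\n']) [] acc.1 acc.2 (by simp)
  simp only [List.nil_append, List.contains_nil] at hb
  rw [hb]
  rw [splitNl_append_newline w]
  simp only [List.dropLast_concat]
  -- now A's foldl over the string labels = (acc.1 ++ subsOf …, acc.2 ++ potsOf …)
  have inner : ∀ (parts : List (List Char)) (a : List String × List String),
      (parts.map String.mk).foldl pvClassify a = (a.1 ++ subsOf parts, a.2 ++ potsOf parts) := by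
    intro parts
    induction parts with
    | nil => intro a; simp [subsOf, potsOf]
    | cons p ps ihp =>
      intro a
      simp only [List.map_cons, List.foldl_cons, ihp]
      unfold pvClassify
      have hstar : PySem.Str.isIn "*" (String.mk p) = p.contains '*' := by
        show PySem.Chars.isIn _ _ = _
        rw [show ("*" : String).toList = ['*'] from rfl, show (String.mk p).toList = p from String.toList_ofList]
        exact isIn_single '*' p
      have hdot : PySem.Str.isIn "." (String.mk p) = p.contains '.' := by
        show PySem.Chars.isIn _ _ = _
        rw [show ("." : String).toList = ['.'] from rfl, show (String.mk p).toList = p from String.toList_ofList]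
        exact isIn_single '.' p
      simp only [hstar, hdot, subsOf, potsOf, List.filter_cons]
      by_cases h1 : '*' ∈ p <;> by_cases h2 : '.' ∈ p <;>
        simp [h1, h2, List.contains_iff_mem]
  simp only [Option.getD_some]
  rw [inner]

-- ===== VERDICT (by name: the statement is the Claim_ definition above) =====
theorem parsing_spec : Claim_equal_parsing := by
  intro json_file _ _
  show parsing json_file = parsing_alt json_file
  simp only [parsing, parsing_alt]
  rw [show (PySem.List.len json_file) = ((json_file.length : Int)) from rfl]
  rw [PySem.List.foldl_pyRange_zero_pyGetD' json_file [] pvEntryStep ([], [])]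
  rw [show pvEntryStep = pvScanEntry from funext fun a => funext fun e => entry_eq a e]
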